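-- pv_equiv track=rewrite | github.com/hdurrani1107/DBS_repo | HW6/wedding_examples/wedding27.py | combine_circular
-- ===== SOURCE A (Python) =====
-- def combine_circular(head_segment_configs, middle_segments_configs, tail_segment, bars):
--     """_summary_
--
--     Args:
--         head_segment_configs (_type_): _description_
--         middle_segments_configs (_type_): _description_
--         tail_segment (_type_): _description_
--         bars (_type_): _description_
--
--     Returns:
--         _type_: _description_
--     """
--     # This function combines the configurations with correct circular handling
--     def recursive_combine(middle_configs, current_config, head_config, tail_config):
--         if not middle_configs:
--             # Combine the current configuration with the head and tail segments
--             combined_config = head_config + current_config + "|" + tail_config  # Add the last barrier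
--             for bar in reversed(bars[:-1]):  # Skip the last barrier
--                 combined_config = combined_config[:bar] + "|" + combined_config[bar:]
--             combined_results.add(combined_config)
--             return
--
--         for config in middle_configs[0]:
--             # Continue combining the configurations
--             recursive_combine(middle_configs[1:], current_config + config, head_config, tail_config)
--
--     # Generate all combinations of head and tail configurations
--     combined_results = set()
--     for head_config, tail_config in head_segment_configs:
--         # Combine middle segments configurations with each valid head-tail pair
--         recursive_combine(middle_segments_configs, "", head_config, tail_config)
--
--     return list(combined_results)
-- ===== SOURCE B (Python) =====
-- def combine_circular(head_segment_configs, middle_segments_configs, tail_segment, bars):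
--     # Iterative Cartesian product of the middle segments, computed ONCE, instead of
--     # re-running the accumulator-passing recursion for every head/tail pair.
--     middles = [""]
--     for options in middle_segments_configs:
--         middles = [acc + opt for acc in middles for opt in options]
--     inner_bars = bars[:-1][::-1]
--     combined_results = set()
--     for head_config, tail_config in head_segment_configs:
--         for mid in middles:
--             s = head_config + mid + "|" + tail_config
--             for bar in inner_bars:
--                 s = s[:bar] + "|" + s[bar:]
--             combined_results.add(s)
--     return list(combined_results)
-- ===== Notes on version B (the rewrite author's own statement) =====
-- stated objective: idiomatic
-- what changed: Replaced the nested accumulator-passing recursion (re-run per head/tail pair) with a flat iterative Cartesian product of the middle segments computed once, then a plain double loop over head/tail pairs and precomputed middle strings; the reversed bar list is also computed once.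
import Mathlib
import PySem

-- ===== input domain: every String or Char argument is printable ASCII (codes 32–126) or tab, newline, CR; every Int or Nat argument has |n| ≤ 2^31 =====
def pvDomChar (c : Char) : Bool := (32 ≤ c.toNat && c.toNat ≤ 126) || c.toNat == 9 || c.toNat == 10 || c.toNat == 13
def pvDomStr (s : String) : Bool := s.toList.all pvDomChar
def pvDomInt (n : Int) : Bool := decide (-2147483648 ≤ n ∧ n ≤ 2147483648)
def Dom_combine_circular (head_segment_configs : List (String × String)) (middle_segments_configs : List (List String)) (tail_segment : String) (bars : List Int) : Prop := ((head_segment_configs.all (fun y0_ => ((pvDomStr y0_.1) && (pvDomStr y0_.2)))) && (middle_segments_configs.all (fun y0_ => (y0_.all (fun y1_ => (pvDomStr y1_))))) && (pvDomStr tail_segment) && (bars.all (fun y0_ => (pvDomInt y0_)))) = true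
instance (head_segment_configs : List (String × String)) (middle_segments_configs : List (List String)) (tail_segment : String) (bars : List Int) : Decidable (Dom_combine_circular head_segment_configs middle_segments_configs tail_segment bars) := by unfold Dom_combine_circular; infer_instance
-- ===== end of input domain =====

-- B computes the Cartesian product of the middle segments once (iteratively) and reuses it for
-- every head/tail pair, instead of A's per-pair accumulator-passing recursion (a flat product loop
-- in place of the nested recursion; same cost, the output size dominates).

-- ===== PORT A =====

-- the `for bar in reversed(bars[:-1]): combined_config = combined_config[:bar] + "|" + combined_config[bar:]` loop
def pvA_insertBars (bars : List Int) (s : List Char) : List Char :=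
  (PySem.List.slice bars none (some (-1))).reverse.foldl
    (fun cc bar => PySem.List.slice cc none (some bar) ++ ['|'] ++ PySem.List.slice cc (some bar) none) s

-- recursive_combine, with the mutated set threaded as `acc` (strings as List Char)
def pvA_recursive (bars : List Int) (middle : List (List String)) (current head tail : List Char)
    (acc : PySem.Set String) : PySem.Set String :=
  match middle with
  | [] => PySem.Set.add acc (String.ofList (pvA_insertBars bars (head ++ current ++ ['|'] ++ tail)))
  | configs :: rest =>
      configs.foldl (fun a config => pvA_recursive bars rest (current ++ config.toList) head tail a) a₀
  where a₀ := acc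

def combine_circular (head_segment_configs : List (String × String)) (middle_segments_configs : List (List String)) (tail_segment : String) (bars : List Int) : List String :=
  head_segment_configs.foldl
    (fun acc p => pvA_recursive bars middle_segments_configs [] p.1.toList p.2.toList acc)
    PySem.Set.empty

-- ===== PORT B =====

-- the same bar-insertion string logic, over the precomputed reversed list
def pvB_insertBars (innerBars : List Int) (s : List Char) : List Char :=
  innerBars.foldl
    (fun cc bar => PySem.List.slice cc none (some bar) ++ ['|'] ++ PySem.List.slice cc (some bar) none) s

def combine_circular_alt (head_segment_configs : List (String × String)) (middle_segments_configs : List (List String)) (tail_segment : String) (bars : List Int) : List String :=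
  let middles : List (List Char) :=
    middle_segments_configs.foldl
      (fun ms options => ms.flatMap (fun acc => options.map (fun o => acc ++ o.toList))) [[]]
  let innerBars := (PySem.List.slice bars none (some (-1))).reverse
  head_segment_configs.foldl
    (fun seen p =>
      middles.foldl
        (fun seen mid =>
          PySem.Set.add seen (String.ofList (pvB_insertBars innerBars (p.1.toList ++ mid ++ ['|'] ++ p.2.toList))))
        seen)
    PySem.Set.empty

-- ===== PRECONDITION & SPEC =====
def Spec_combine_circular (head_segment_configs : List (String × String)) (middle_segments_configs : List (List String)) (tail_segment : String) (bars : List Int) (out : List String) : Prop := out = combine_circular_alt head_segment_configs middle_segments_configs tail_segment bars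
instance (head_segment_configs : List (String × String)) (middle_segments_configs : List (List String)) (tail_segment : String) (bars : List Int) (out : List String) : Decidable (Spec_combine_circular head_segment_configs middle_segments_configs tail_segment bars out) := by unfold Spec_combine_circular; infer_instance

-- ===== CLAIM (what is proved, stated in full; the proofs are below) =====
def Claim_equal_combine_circular : Prop := ∀ (head_segment_configs : List (String × String)) (middle_segments_configs : List (List String)) (tail_segment : String) (bars : List Int), Dom_combine_circular head_segment_configs middle_segments_configs tail_segment bars → Spec_combine_circular head_segment_configs middle_segments_configs tail_segment bars (combine_circular head_segment_configs middle_segments_configs tail_segment bars)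

-- ===== LEMMAS AND PROOFS =====

-- the Cartesian product of the middle segments, right to left (A's recursion order)
def pvProds (middle : List (List String)) : List (List Char) :=
  match middle with
  | [] => [[]]
  | configs :: rest => configs.flatMap (fun c => (pvProds rest).map (fun m => c.toList ++ m))

theorem pvA_recursive_eq (bars : List Int) (middle : List (List String))
    (current head tail : List Char) (acc : PySem.Set String) :
    pvA_recursive bars middle current head tail acc
      = (pvProds middle).foldl
          (fun a mid => PySem.Set.add a (String.ofList (pvA_insertBars bars (head ++ (current ++ mid) ++ ['|'] ++ tail)))) acc := by
  induction middle generalizing current acc with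
  | nil => simp [pvA_recursive, pvProds]
  | cons configs rest ih =>
      simp only [pvA_recursive, pvProds, List.foldl_flatMap, List.foldl_map]
      exact PySem.List.foldl_congr_mem _ _ _ _ (fun a c _ => by rw [ih]; simp [List.append_assoc])

theorem pvMiddles_eq (middle : List (List String)) (ms : List (List Char)) :
    middle.foldl (fun ms options => ms.flatMap (fun acc => options.map (fun o => acc ++ o.toList))) ms
      = ms.flatMap (fun p => (pvProds middle).map (fun m => p ++ m)) := by
  induction middle generalizing ms with
  | nil => simp [pvProds]
  | cons options rest ih =>
      simp only [List.foldl_cons, ih, pvProds, List.flatMap_assoc, List.map_flatMap,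
        List.flatMap_map, List.map_map, Function.comp_def, List.append_assoc]

-- ===== VERDICT (by name: the statement is the Claim_ definition above) =====
theorem combine_circular_spec : Claim_equal_combine_circular := by
  intro hsc msc tail bars _
  show _ = _
  unfold combine_circular combine_circular_alt
  have hm : (msc.foldl (fun ms options => ms.flatMap (fun acc => options.map (fun o => acc ++ o.toList))) [[]])
      = pvProds msc := by
    rw [pvMiddles_eq]; simp
  rw [hm]
  refine PySem.List.foldl_congr_mem _ _ _ _ (fun a p _ => ?_)
  rw [pvA_recursive_eq]
  refine PySem.List.foldl_congr_mem _ _ _ _ (fun a mid _ => ?_)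
  simp [pvA_insertBars, pvB_insertBars]
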